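-- pv_equiv track=rewrite | github.com/MMannuru/CS1301 | HW09.py | midtownPlanner
-- ===== SOURCE A (Python) =====
-- def midtownPlanner(restaurantChoices):
--     def favRestaurant(dict, TAname, restaurant):
--         if restaurant in dict:
--             dict[restaurant].append(TAname)
--             dict[restaurant].sort()
--         else:
--             dict[restaurant] = [TAname]
--         return dict
--
--     if len(restaurantChoices) == 0:
--         return {}
--
--     select = restaurantChoices[0]
--     return favRestaurant(midtownPlanner(restaurantChoices[1:]), select[0], select[1])
-- ===== SOURCE B (Python) =====
-- def midtownPlanner(restaurantChoices):
--     result = {}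
--     for select in reversed(restaurantChoices):
--         result.setdefault(select[1], []).append(select[0])
--     for restaurant in result:
--         result[restaurant].sort()
--     return result
-- ===== Notes on version B (the rewrite author's own statement) =====
-- stated objective: simpler
-- what changed: Replaces A's recursion (one slice per element, and a full re-sort of the group list at every insertion) with a single iterative grouping pass over the reversed list using setdefault, followed by one sort per group at the end.
import Mathlib
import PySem

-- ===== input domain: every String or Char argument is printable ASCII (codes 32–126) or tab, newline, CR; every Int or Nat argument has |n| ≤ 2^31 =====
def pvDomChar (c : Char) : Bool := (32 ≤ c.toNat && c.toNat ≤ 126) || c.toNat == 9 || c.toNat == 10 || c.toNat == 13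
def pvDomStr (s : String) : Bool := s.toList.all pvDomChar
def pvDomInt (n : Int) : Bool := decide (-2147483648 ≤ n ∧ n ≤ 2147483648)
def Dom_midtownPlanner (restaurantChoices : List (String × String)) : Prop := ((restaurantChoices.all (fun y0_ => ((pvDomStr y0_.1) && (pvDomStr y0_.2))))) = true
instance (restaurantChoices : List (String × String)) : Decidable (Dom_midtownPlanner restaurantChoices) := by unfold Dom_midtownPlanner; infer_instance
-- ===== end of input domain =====

-- B replaces A's recursion with re-sort-on-every-insert by one iterative grouping pass plus a single
-- final sort per list (objective: simpler; same return value, A mutates nothing observable).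

-- ===== PORT A =====
-- inner helper favRestaurant: append the name and re-sort, or create a singleton list
def favRestaurant (d : PySem.Dict String (List String)) (TAname restaurant : String) :
    PySem.Dict String (List String) :=
  if d.contains restaurant then
    -- dict[restaurant].append(TAname); dict[restaurant].sort()
    d.modify restaurant [] (fun l => PySem.List.sorted (l ++ [TAname]) (fun x => x))
  else
    d.insert restaurant [TAname]

-- the recursion of A, producing the dict
def midtownPlannerDict : List (String × String) → PySem.Dict String (List String)
  | [] => PySem.Dict.empty
  | select :: rest => favRestaurant (midtownPlannerDict rest) select.1 select.2

def midtownPlanner (restaurantChoices : List (String × String)) : List (String × List String) :=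
  (midtownPlannerDict restaurantChoices).items

-- ===== PORT B =====
def midtownPlanner_alt (restaurantChoices : List (String × String)) : List (String × List String) :=
  -- for select in reversed(restaurantChoices): result.setdefault(select[1], []).append(select[0])
  -- then: for restaurant in result: result[restaurant].sort()
  ((restaurantChoices.reverse.foldl
      (fun d select => d.modify select.2 [] (fun l => l ++ [select.1]))
      PySem.Dict.empty).items).map
    (fun p => (p.1, PySem.List.sorted p.2 (fun x => x)))

-- ===== PRECONDITION & SPEC =====
def Spec_midtownPlanner (restaurantChoices : List (String × String)) (out : List (String × List String)) : Prop := out = midtownPlanner_alt restaurantChoices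
instance (restaurantChoices : List (String × String)) (out : List (String × List String)) : Decidable (Spec_midtownPlanner restaurantChoices out) := by unfold Spec_midtownPlanner; infer_instance

-- ===== CLAIM (what is proved, stated in full; the proofs are below) =====
def Claim_equal_midtownPlanner : Prop := ∀ (restaurantChoices : List (String × String)), Dom_midtownPlanner restaurantChoices → Spec_midtownPlanner restaurantChoices (midtownPlanner restaurantChoices)

-- ===== LEMMAS AND PROOFS =====

-- sorting after inserting into an already-sorted list = one final sort
theorem sort_sorted_append (l : List String) (n : String) :
    PySem.List.sorted (PySem.List.sorted l (fun x => x) ++ [n]) (fun x => x)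
      = PySem.List.sorted (l ++ [n]) (fun x => x) := by
  apply PySem.List.eq_of_perm_of_pairwise_le_of_injective (fun x => x) Function.injective_id
  · exact ((PySem.List.sorted_perm _ _ _).trans
      ((PySem.List.sorted_perm l _ _).append_right [n])).trans
      (PySem.List.sorted_perm (l ++ [n]) _ _).symm
  · exact PySem.List.sorted_pairwise _ _
  · exact PySem.List.sorted_pairwise _ _

-- the invariant tying A's dict to B's raw (unsorted) dict through the loop
theorem fold_inv (l : List (String × String)) (D G : PySem.Dict String (List String))
    (hk : D.keys = G.keys)
    (hv : ∀ k, D.getD k [] = PySem.List.sorted (G.getD k []) (fun x => x)) :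
    (l.foldl (fun d s => favRestaurant d s.1 s.2) D).keys
        = (l.foldl (fun d s => d.modify s.2 [] (fun v => v ++ [s.1])) G).keys ∧
    ∀ k, (l.foldl (fun d s => favRestaurant d s.1 s.2) D).getD k []
        = PySem.List.sorted
            ((l.foldl (fun d s => d.modify s.2 [] (fun v => v ++ [s.1])) G).getD k [])
            (fun x => x) := by
  induction l generalizing D G with
  | nil => exact ⟨hk, hv⟩
  | cons s t ih =>
    simp only [List.foldl_cons]
    apply ih
    · -- keys after one step
      unfold favRestaurant
      by_cases hc : D.contains s.2 = true
      · rw [if_pos hc, PySem.Dict.keys_modify, PySem.Dict.keys_modify,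
            PySem.Dict.keys_insert_of_contains _ _ hc,
            PySem.Dict.keys_insert_of_contains, hk]
        rw [PySem.Dict.contains_iff_mem_keys] at hc ⊢
        rwa [← hk]
      · rw [if_neg hc, PySem.Dict.keys_modify,
            PySem.Dict.keys_insert_of_not_contains _ _ (by simpa using hc),
            PySem.Dict.keys_insert_of_not_contains, hk]
        rw [Bool.not_eq_true] at hc
        rw [PySem.Dict.contains_eq_decide_mem_keys] at hc ⊢
        rwa [← hk]
    · -- values after one step
      intro k
      unfold favRestaurant
      by_cases hc : D.contains s.2 = true
      · rw [if_pos hc, PySem.Dict.getD_modify, PySem.Dict.getD_modify]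
        by_cases hks : k = s.2
        · rw [if_pos hks, if_pos hks, hv s.2, sort_sorted_append]
        · rw [if_neg hks, if_neg hks]; exact hv k
      · have hgc : G.contains s.2 = false := by
          rw [PySem.Dict.contains_eq_decide_mem_keys] at hc ⊢
          rw [← hk]
          simpa using hc
        rw [if_neg hc, PySem.Dict.getD_insert, PySem.Dict.getD_modify]
        by_cases hks : k = s.2
        · rw [if_pos hks, if_pos hks, PySem.Dict.getD_of_not_contains _ _ hgc]
          rfl
        · rw [if_neg hks, if_neg hks]; exact hv k

-- A's recursion is the fold of favRestaurant over the reversed list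
theorem midtownPlannerDict_eq_foldl (rc : List (String × String)) :
    midtownPlannerDict rc
      = rc.reverse.foldl (fun d s => favRestaurant d s.1 s.2) PySem.Dict.empty := by
  induction rc with
  | nil => rfl
  | cons s t ih =>
    simp only [midtownPlannerDict, List.reverse_cons, List.foldl_append, List.foldl_cons,
      List.foldl_nil, ih]

-- ===== VERDICT (by name: the statement is the Claim_ definition above) =====
theorem midtownPlanner_spec : Claim_equal_midtownPlanner := by
  intro rc _
  unfold Spec_midtownPlanner midtownPlanner midtownPlanner_alt
  rw [midtownPlannerDict_eq_foldl]
  have hnd : (rc.reverse.foldl (fun d s => d.modify s.2 [] (fun v => v ++ [s.1]))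
      PySem.Dict.empty).keys.Nodup :=
    PySem.Dict.nodup_keys_foldl_modify_key rc.reverse (fun s => s.2) []
      (fun d s v => v ++ [s.1]) PySem.Dict.empty PySem.Dict.nodup_keys_empty
  obtain ⟨hk, hv⟩ := fold_inv rc.reverse PySem.Dict.empty PySem.Dict.empty rfl
    (fun k => rfl)
  rw [PySem.Dict.items_eq_map_keys _ (by rw [hk]; exact hnd) ([] : List String),
      PySem.Dict.items_eq_map_keys _ hnd ([] : List String), hk, List.map_map]
  exact List.map_congr_left (fun k _ => by
    simp only [Function.comp_apply]
    exact congrArg (fun v => (k, v)) (hv k))
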